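-- pv_equiv track=rewrite | github.com/bprager/MemoryVault | memoryvault/onboarding.py | infer_candidate_fields
-- ===== SOURCE A (Python) =====
-- from collections import Counter, defaultdict
--
-- CATEGORY_TO_STARTER_FIELD = {
--     "assumption": "assumptions",
--     "blocker": "blockers",
--     "decision": "decisions",
--     "lesson": "lessons",
--     "open_question": "open_questions",
-- }
--
-- def infer_candidate_fields(candidate_type_counts: Counter[str]) -> list[str]:
--     inferred = {
--         CATEGORY_TO_STARTER_FIELD[category]
--         for category, count in candidate_type_counts.items()
--         if count > 0 and category in CATEGORY_TO_STARTER_FIELD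
--     }
--     if "attempt" in candidate_type_counts or "outcome" in candidate_type_counts:
--         inferred.add("recent_failures")
--     return sorted(inferred)
-- ===== SOURCE B (Python) =====
-- _SORTED_FIELDS = ["assumptions", "blockers", "decisions", "lessons",
--                   "open_questions", "recent_failures"]
-- _SLOT = {"assumption": 0, "blocker": 1, "decision": 2, "lesson": 3,
--          "open_question": 4}
--
-- def infer_candidate_fields(candidate_type_counts):
--     present = [False] * 6
--     for category, count in candidate_type_counts.items():
--         if category in ("attempt", "outcome"):
--             present[5] = True
--         elif count > 0 and category in _SLOT:
--             present[_SLOT[category]] = True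
--     return [field for field, flag in zip(_SORTED_FIELDS, present) if flag]
-- ===== Notes on version B (the rewrite author's own statement) =====
-- stated objective: alternative
-- what changed: B replaces A's set-comprehension-plus-sorted pipeline with a flag-array algorithm: one pass over the counter's items sets booleans in a fixed 6-slot presence array (slot 5 for attempt/outcome), then the result is decoded by filtering a pre-sorted constant field list against the flags, so no set and no sort are performed.
import Mathlib
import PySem

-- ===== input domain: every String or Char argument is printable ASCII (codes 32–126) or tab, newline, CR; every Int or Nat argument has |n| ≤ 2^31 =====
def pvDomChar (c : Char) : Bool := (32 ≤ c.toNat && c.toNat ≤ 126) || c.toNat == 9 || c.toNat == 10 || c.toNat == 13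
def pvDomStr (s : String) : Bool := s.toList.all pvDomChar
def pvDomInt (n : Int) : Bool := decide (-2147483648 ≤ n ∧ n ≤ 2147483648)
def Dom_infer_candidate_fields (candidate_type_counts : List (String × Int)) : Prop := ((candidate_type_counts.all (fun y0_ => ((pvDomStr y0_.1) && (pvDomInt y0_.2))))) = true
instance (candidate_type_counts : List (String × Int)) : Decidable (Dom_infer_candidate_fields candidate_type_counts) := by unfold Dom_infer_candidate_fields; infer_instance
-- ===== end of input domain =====

-- B replaces A's set-comprehension + sorted pipeline with a flag-array algorithm: one
-- pass over the counter's items sets booleans in a fixed 6-slot presence array, then the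
-- output is decoded by filtering a pre-sorted constant field list against the flags
-- (no set, no sort); objective: alternative.

-- ===== PORT A =====
def CATEGORY_TO_STARTER_FIELD : PySem.Dict String String :=
  PySem.Dict.mk
    [("assumption", "assumptions"),
     ("blocker", "blockers"),
     ("decision", "decisions"),
     ("lesson", "lessons"),
     ("open_question", "open_questions")]

def infer_candidate_fields (candidate_type_counts : List (String × Int)) : List String :=
  let d := PySem.Dict.mk candidate_type_counts
  -- set comprehension over the counter's items, filtered through the table
  let inferred : PySem.Set String :=
    d.items.foldl
      (fun s p =>
        if 0 < p.2 ∧ CATEGORY_TO_STARTER_FIELD.contains p.1 = true then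
          PySem.Set.add s (CATEGORY_TO_STARTER_FIELD.getD p.1 "")
        else s)
      PySem.Set.empty
  let inferred :=
    if d.contains "attempt" = true ∨ d.contains "outcome" = true then
      PySem.Set.add inferred "recent_failures"
    else inferred
  PySem.List.sorted inferred (fun x => x) false

-- ===== PORT B =====
def SORTED_FIELDS : List String :=
  ["assumptions", "blockers", "decisions", "lessons", "open_questions", "recent_failures"]

def SLOT : PySem.Dict String Int :=
  PySem.Dict.mk
    [("assumption", 0), ("blocker", 1), ("decision", 2), ("lesson", 3), ("open_question", 4)]

def infer_candidate_fields_alt (candidate_type_counts : List (String × Int)) : List String :=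
  let d := PySem.Dict.mk candidate_type_counts
  -- one pass: set presence flags in the fixed 6-slot array
  let present : List Bool :=
    d.items.foldl
      (fun present p =>
        if p.1 = "attempt" ∨ p.1 = "outcome" then
          present.set 5 true
        else if 0 < p.2 ∧ SLOT.contains p.1 = true then
          -- present[_SLOT[category]] = True: the index is a table literal in 0..4, exact
          present.set (SLOT.getD p.1 0).toNat true
        else present)
      [false, false, false, false, false, false]
  -- decode: filter the pre-sorted field list against the flags
  (SORTED_FIELDS.zip present).filterMap (fun q => if q.2 then some q.1 else none)

-- ===== PRECONDITION & SPEC =====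
def Spec_infer_candidate_fields (candidate_type_counts : List (String × Int)) (out : List String) : Prop := out = infer_candidate_fields_alt candidate_type_counts
instance (candidate_type_counts : List (String × Int)) (out : List String) : Decidable (Spec_infer_candidate_fields candidate_type_counts out) := by unfold Spec_infer_candidate_fields; infer_instance

-- ===== CLAIM (what is proved, stated in full; the proofs are below) =====
def Claim_equal_infer_candidate_fields : Prop := ∀ (candidate_type_counts : List (String × Int)), Dom_infer_candidate_fields candidate_type_counts → Spec_infer_candidate_fields candidate_type_counts (infer_candidate_fields candidate_type_counts)

-- ===== LEMMAS AND PROOFS =====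

-- the per-slot triggers of B's pass, as Bool tests on one item
def trig0 (p : String × Int) : Bool := p.1 == "assumption" && decide (0 < p.2)
def trig1 (p : String × Int) : Bool := p.1 == "blocker" && decide (0 < p.2)
def trig2 (p : String × Int) : Bool := p.1 == "decision" && decide (0 < p.2)
def trig3 (p : String × Int) : Bool := p.1 == "lesson" && decide (0 < p.2)
def trig4 (p : String × Int) : Bool := p.1 == "open_question" && decide (0 < p.2)
def trig5 (p : String × Int) : Bool := p.1 == "attempt" || p.1 == "outcome"

theorem B_fold (l : List (String × Int)) (b0 b1 b2 b3 b4 b5 : Bool) :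
    l.foldl
      (fun present p =>
        if p.1 = "attempt" ∨ p.1 = "outcome" then
          present.set 5 true
        else if 0 < p.2 ∧ SLOT.contains p.1 = true then
          present.set (SLOT.getD p.1 0).toNat true
        else present)
      [b0, b1, b2, b3, b4, b5] =
    [b0 || l.any trig0, b1 || l.any trig1, b2 || l.any trig2,
     b3 || l.any trig3, b4 || l.any trig4, b5 || l.any trig5] := by
  induction l generalizing b0 b1 b2 b3 b4 b5 with
  | nil => simp
  | cons q t ih =>
    obtain ⟨c, v⟩ := q
    simp only [List.foldl_cons, List.any_cons]
    by_cases h1 : c = "attempt" ∨ c = "outcome"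
    · rw [if_pos h1,
        show ([b0, b1, b2, b3, b4, b5].set 5 true) = [b0, b1, b2, b3, b4, true] from rfl, ih]
      rcases h1 with rfl | rfl <;>
        simp [trig0, trig1, trig2, trig3, trig4, trig5, Bool.or_assoc]
    · rw [if_neg h1]
      push_neg at h1
      by_cases h2 : 0 < v ∧ SLOT.contains c = true
      · have hc : "assumption" = c ∨ "blocker" = c ∨ "decision" = c ∨ "lesson" = c ∨
            "open_question" = c := by
          have := h2.2
          simpa [SLOT, PySem.Dict.contains] using this
        rw [if_pos h2]
        rcases hc with rfl | rfl | rfl | rfl | rfl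
        · rw [show ([b0, b1, b2, b3, b4, b5].set (SLOT.getD "assumption" 0).toNat true)
              = [true, b1, b2, b3, b4, b5] from rfl, ih]
          simp [trig0, trig1, trig2, trig3, trig4, trig5, h2.1, h1.1, h1.2, Bool.or_assoc]
        · rw [show ([b0, b1, b2, b3, b4, b5].set (SLOT.getD "blocker" 0).toNat true)
              = [b0, true, b2, b3, b4, b5] from rfl, ih]
          simp [trig0, trig1, trig2, trig3, trig4, trig5, h2.1, h1.1, h1.2, Bool.or_assoc]
        · rw [show ([b0, b1, b2, b3, b4, b5].set (SLOT.getD "decision" 0).toNat true)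
              = [b0, b1, true, b3, b4, b5] from rfl, ih]
          simp [trig0, trig1, trig2, trig3, trig4, trig5, h2.1, h1.1, h1.2, Bool.or_assoc]
        · rw [show ([b0, b1, b2, b3, b4, b5].set (SLOT.getD "lesson" 0).toNat true)
              = [b0, b1, b2, true, b4, b5] from rfl, ih]
          simp [trig0, trig1, trig2, trig3, trig4, trig5, h2.1, h1.1, h1.2, Bool.or_assoc]
        · rw [show ([b0, b1, b2, b3, b4, b5].set (SLOT.getD "open_question" 0).toNat true)
              = [b0, b1, b2, b3, true, b5] from rfl, ih]
          simp [trig0, trig1, trig2, trig3, trig4, trig5, h2.1, h1.1, h1.2, Bool.or_assoc]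
      · rw [if_neg h2, ih]
        rcases not_and_or.mp h2 with hv | hcon
        · have hv' : decide (0 < v) = false := decide_eq_false hv
          have e1 : (c == "attempt") = false := beq_eq_false_iff_ne.mpr h1.1
          have e2 : (c == "outcome") = false := beq_eq_false_iff_ne.mpr h1.2
          simp [trig0, trig1, trig2, trig3, trig4, trig5, hv', e1, e2]
        · have hc : ¬ (c = "assumption" ∨ c = "blocker" ∨ c = "decision" ∨ c = "lesson" ∨
              c = "open_question") := by
            intro h
            apply hcon
            rcases h with rfl | rfl | rfl | rfl | rfl <;> rfl
          push_neg at hc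
          have e1 : (c == "attempt") = false := beq_eq_false_iff_ne.mpr h1.1
          have e2 : (c == "outcome") = false := beq_eq_false_iff_ne.mpr h1.2
          have e3 : (c == "assumption") = false := beq_eq_false_iff_ne.mpr hc.1
          have e4 : (c == "blocker") = false := beq_eq_false_iff_ne.mpr hc.2.1
          have e5 : (c == "decision") = false := beq_eq_false_iff_ne.mpr hc.2.2.1
          have e6 : (c == "lesson") = false := beq_eq_false_iff_ne.mpr hc.2.2.2.1
          have e7 : (c == "open_question") = false := beq_eq_false_iff_ne.mpr hc.2.2.2.2
          simp [trig0, trig1, trig2, trig3, trig4, trig5, e1, e2, e3, e4, e5, e6, e7]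
theorem fields_sorted : SORTED_FIELDS.Pairwise (· < ·) := by
  have h : (SORTED_FIELDS.map String.toList).Pairwise (· < ·) := by decide
  rw [List.pairwise_map] at h
  exact h.imp fun hab => String.lt_iff_toList_lt.mpr hab

theorem decode_sublist (xs : List String) (bs : List Bool) :
    ((xs.zip bs).filterMap (fun q => if q.2 then some q.1 else none)).Sublist xs := by
  induction xs generalizing bs with
  | nil => simp
  | cons x t ih =>
    cases bs with
    | nil => simp
    | cons b bt =>
      cases b
      · simpa using (ih bt).cons x
      · simpa using (ih bt).cons₂ x

theorem B_decode_mem (b0 b1 b2 b3 b4 b5 : Bool) (f : String) :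
    f ∈ (SORTED_FIELDS.zip [b0, b1, b2, b3, b4, b5]).filterMap
        (fun q => if q.2 then some q.1 else none) ↔
    (b0 = true ∧ f = "assumptions") ∨ (b1 = true ∧ f = "blockers") ∨
    (b2 = true ∧ f = "decisions") ∨ (b3 = true ∧ f = "lessons") ∨
    (b4 = true ∧ f = "open_questions") ∨ (b5 = true ∧ f = "recent_failures") := by
  rw [show SORTED_FIELDS.zip [b0, b1, b2, b3, b4, b5] =
      [("assumptions", b0), ("blockers", b1), ("decisions", b2), ("lessons", b3),
       ("open_questions", b4), ("recent_failures", b5)] from rfl]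
  simp [List.mem_filterMap, Option.ite_none_right_eq_some, and_comm]

-- membership in A's accumulating set
theorem memA_fold (l : List (String × Int)) (s : PySem.Set String) (f : String) :
    f ∈ l.foldl
      (fun s p =>
        if 0 < p.2 ∧ CATEGORY_TO_STARTER_FIELD.contains p.1 = true then
          PySem.Set.add s (CATEGORY_TO_STARTER_FIELD.getD p.1 "")
        else s) s ↔
    f ∈ s ∨ ∃ p, p ∈ l ∧ 0 < p.2 ∧ CATEGORY_TO_STARTER_FIELD.contains p.1 = true ∧
      CATEGORY_TO_STARTER_FIELD.getD p.1 "" = f := by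
  induction l generalizing s with
  | nil => simp
  | cons q t ih =>
    simp only [List.foldl_cons, ih]
    by_cases hq : 0 < q.2 ∧ CATEGORY_TO_STARTER_FIELD.contains q.1 = true
    · simp only [if_pos hq, PySem.Set.mem_add, List.mem_cons]
      constructor
      · rintro (⟨hs | hf⟩ | ⟨p, hp, h⟩)
        · exact Or.inl hs
        · exact Or.inr ⟨q, Or.inl rfl, hq.1, hq.2, hf.symm⟩
        · exact Or.inr ⟨p, Or.inr hp, h⟩
      · rintro (hs | ⟨p, (rfl | hp), h⟩)
        · exact Or.inl (Or.inl hs)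
        · exact Or.inl (Or.inr h.2.2.symm)
        · exact Or.inr ⟨p, hp, h⟩
    · simp only [if_neg hq, List.mem_cons]
      constructor
      · rintro (hs | ⟨p, hp, h⟩)
        · exact Or.inl hs
        · exact Or.inr ⟨p, Or.inr hp, h⟩
      · rintro (hs | ⟨p, (rfl | hp), h⟩)
        · exact Or.inl hs
        · exact absurd ⟨h.1, h.2.1⟩ hq
        · exact Or.inr ⟨p, hp, h⟩

-- A's accumulating set stays duplicate-free
theorem nodupA_fold (l : List (String × Int)) (s : PySem.Set String) (hs : s.Nodup) :
    (l.foldl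
      (fun s p =>
        if 0 < p.2 ∧ CATEGORY_TO_STARTER_FIELD.contains p.1 = true then
          PySem.Set.add s (CATEGORY_TO_STARTER_FIELD.getD p.1 "")
        else s) s).Nodup := by
  induction l generalizing s with
  | nil => exact hs
  | cons q t ih =>
    simp only [List.foldl_cons]
    by_cases hq : 0 < q.2 ∧ CATEGORY_TO_STARTER_FIELD.contains q.1 = true
    · exact ih _ (by rw [if_pos hq]; exact PySem.Set.nodup_add _ _ hs)
    · exact ih _ (by rwa [if_neg hq])

-- A's set-comprehension condition, resolved against the literal table and B's triggers
theorem A_ex_iff (l : List (String × Int)) (f : String) :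
    (∃ p, p ∈ l ∧ 0 < p.2 ∧ CATEGORY_TO_STARTER_FIELD.contains p.1 = true ∧
      CATEGORY_TO_STARTER_FIELD.getD p.1 "" = f) ↔
    (l.any trig0 = true ∧ f = "assumptions") ∨
    (l.any trig1 = true ∧ f = "blockers") ∨
    (l.any trig2 = true ∧ f = "decisions") ∨
    (l.any trig3 = true ∧ f = "lessons") ∨
    (l.any trig4 = true ∧ f = "open_questions") := by
  simp only [List.any_eq_true, trig0, trig1, trig2, trig3, trig4,
    Bool.and_eq_true, beq_iff_eq, decide_eq_true_eq]
  constructor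
  · rintro ⟨⟨c, v⟩, hm, hv, hc, hg⟩
    have : "assumption" = c ∨ "blocker" = c ∨ "decision" = c ∨ "lesson" = c ∨
        "open_question" = c := by
      simpa [CATEGORY_TO_STARTER_FIELD, PySem.Dict.contains] using hc
    rcases this with rfl | rfl | rfl | rfl | rfl
    · exact Or.inl ⟨⟨_, hm, rfl, hv⟩, by simpa [CATEGORY_TO_STARTER_FIELD] using hg.symm⟩
    · exact Or.inr (Or.inl ⟨⟨_, hm, rfl, hv⟩, by simpa [CATEGORY_TO_STARTER_FIELD] using hg.symm⟩)
    · exact Or.inr (Or.inr (Or.inl ⟨⟨_, hm, rfl, hv⟩, by simpa [CATEGORY_TO_STARTER_FIELD] using hg.symm⟩))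
    · exact Or.inr (Or.inr (Or.inr (Or.inl ⟨⟨_, hm, rfl, hv⟩, by simpa [CATEGORY_TO_STARTER_FIELD] using hg.symm⟩)))
    · exact Or.inr (Or.inr (Or.inr (Or.inr ⟨⟨_, hm, rfl, hv⟩, by simpa [CATEGORY_TO_STARTER_FIELD] using hg.symm⟩)))
  · rintro (⟨⟨p, hm, hc, hv⟩, rfl⟩ | ⟨⟨p, hm, hc, hv⟩, rfl⟩ | ⟨⟨p, hm, hc, hv⟩, rfl⟩ |
      ⟨⟨p, hm, hc, hv⟩, rfl⟩ | ⟨⟨p, hm, hc, hv⟩, rfl⟩) <;>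
    · refine ⟨p, hm, hv, ?_, ?_⟩ <;> rw [hc] <;> rfl

-- A's attempt/outcome presence flag, as B's slot-5 trigger over the items
theorem A_flag_iff (d : PySem.Dict String Int) :
    (d.contains "attempt" = true ∨ d.contains "outcome" = true) ↔
    d.items.any trig5 = true := by
  simp only [PySem.Dict.contains_iff_mem_keys, PySem.Dict.keys, List.mem_map,
    List.any_eq_true, trig5, Bool.or_eq_true, beq_iff_eq]
  constructor
  · rintro (⟨p, hp, h⟩ | ⟨p, hp, h⟩)
    · exact ⟨p, hp, Or.inl h⟩
    · exact ⟨p, hp, Or.inr h⟩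
  · rintro ⟨p, hp, h | h⟩
    · exact Or.inl ⟨p, hp, h⟩
    · exact Or.inr ⟨p, hp, h⟩

-- ===== VERDICT (by name: the statement is the Claim_ definition above) =====
set_option maxHeartbeats 1000000 in
theorem infer_candidate_fields_spec : Claim_equal_infer_candidate_fields := by
  intro l _
  unfold Spec_infer_candidate_fields infer_candidate_fields infer_candidate_fields_alt
  simp only []
  rw [B_fold]
  simp only [Bool.false_or]
  apply PySem.List.sorted_eq_of_perm_of_pairwise_lt
  · -- the decoded flag list is a permutation of A's set: both nodup, same membership
    have hpair := List.Pairwise.sublist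
      (decode_sublist SORTED_FIELDS
        [l.any trig0, l.any trig1, l.any trig2, l.any trig3, l.any trig4, l.any trig5])
      fields_sorted
    refine (List.perm_ext_iff_of_nodup (List.Pairwise.imp ne_of_lt hpair) ?_).mpr ?_
    · split_ifs with h
      · exact PySem.Set.nodup_add _ _ (nodupA_fold _ _ List.nodup_nil)
      · exact nodupA_fold _ _ List.nodup_nil
    · intro f
      rw [B_decode_mem]
      by_cases hflag : (PySem.Dict.mk l).contains "attempt" = true ∨
          (PySem.Dict.mk l).contains "outcome" = true
      · rw [if_pos hflag, PySem.Set.mem_add, memA_fold, A_ex_iff]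
        have h5 : l.any trig5 = true := (A_flag_iff _).mp hflag
        simp only [PySem.Set.empty, List.not_mem_nil, false_or, h5, true_and]
        tauto
      · rw [if_neg hflag, memA_fold, A_ex_iff]
        have h5' : ¬ l.any trig5 = true := fun h => hflag ((A_flag_iff _).mpr h)
        have h5 : l.any trig5 = false := by simpa using h5'
        simp only [PySem.Set.empty, List.not_mem_nil, false_or]
        simp [h5]
  · exact List.Pairwise.sublist (decode_sublist _ _) fields_sorted
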